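-- pv_equiv track=rewrite | github.com/blas1n/Algorithm | HackerRank/algorithm/Subarrays_with_Given_Sum_and_Bounded_Maximum.py | countSubarraysWithSumAndMaxAtMost
-- ===== SOURCE A (Python) =====
-- def countSubarraysWithSumAndMaxAtMost(nums, k, M):
--     if not nums:
--         return 0
--
--     prefixs = {0:1}
--     answer, prefix = 0, 0
--     for num in nums:
--         if num > M:
--             prefixs = {0:1}
--             prefix = 0
--         else:
--             prefix += num
--             delta = prefix - k
--             if delta in prefixs:
--                 answer += prefixs[delta]
--             prefixs[prefix] = prefixs.get(prefix, 0) + 1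
--     return answer
-- ===== SOURCE B (Python) =====
-- def countSubarraysWithSumAndMaxAtMost(nums, k, M):
--     # Phase 1: partition nums into maximal segments of elements <= M
--     segments = []
--     cur = []
--     for num in nums:
--         if num > M:
--             segments.append(cur)
--             cur = []
--         else:
--             cur.append(num)
--     segments.append(cur)
--     # Phase 2: independent prefix-sum counting per segment
--     total = 0
--     for seg in segments:
--         prefixs = {0: 1}
--         prefix = 0
--         for num in seg:
--             prefix += num
--             delta = prefix - k
--             if delta in prefixs:
--                 total += prefixs[delta]
--             prefixs[prefix] = prefixs.get(prefix, 0) + 1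
--     return total
-- ===== Notes on version B (the rewrite author's own statement) =====
-- stated objective: alternative
-- what changed: Replaces A's single loop with inline state reset by an explicit two-phase structure: first partition nums into barrier-free segments, then count each segment with an independent prefix-sum map and sum the per-segment counts.
import Mathlib
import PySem

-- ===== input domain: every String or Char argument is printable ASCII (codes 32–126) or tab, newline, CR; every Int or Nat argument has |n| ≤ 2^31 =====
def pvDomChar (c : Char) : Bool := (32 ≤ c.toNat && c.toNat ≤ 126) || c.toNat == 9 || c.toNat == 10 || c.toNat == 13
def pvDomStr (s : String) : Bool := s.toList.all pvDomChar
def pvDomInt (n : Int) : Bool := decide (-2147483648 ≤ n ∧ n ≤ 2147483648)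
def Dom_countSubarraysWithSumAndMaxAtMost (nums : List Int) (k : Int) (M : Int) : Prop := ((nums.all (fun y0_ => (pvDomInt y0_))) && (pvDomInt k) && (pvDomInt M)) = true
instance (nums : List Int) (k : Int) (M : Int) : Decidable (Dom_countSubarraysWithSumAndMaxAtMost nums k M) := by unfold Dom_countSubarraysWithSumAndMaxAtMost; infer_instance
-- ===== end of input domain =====

-- B replaces A's single loop with an inline reset by an explicit partition-into-segments
-- phase followed by an independent prefix-sum count per segment (alternative decomposition,
-- same cost); both Pythons are total, so there is no Pre_.

-- ===== PORT A =====
-- shared helper: the prefix-sum counting step (the Python loop body that is textually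
-- identical in A's else-branch and in B's inner loop): state = (prefixs, answer, prefix)
def pvDict0 : PySem.Dict Int Int := (PySem.Dict.empty).insert 0 1

def pvStep (k : Int) (st : PySem.Dict Int Int × Int × Int) (num : Int) :
    PySem.Dict Int Int × Int × Int :=
  let p := st.2.2 + num
  let delta := p - k
  let ans := match st.1.get? delta with
             | some v => st.2.1 + v
             | none => st.2.1
  (st.1.insert p (st.1.getD p 0 + 1), ans, p)

def countSubarraysWithSumAndMaxAtMost (nums : List Int) (k : Int) (M : Int) : Int :=
  if nums = [] then 0
  else
    (nums.foldl
      (fun st num => if num > M then (pvDict0, st.2.1, 0) else pvStep k st num)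
      (pvDict0, 0, 0)).2.1

-- ===== PORT B =====
-- phase 1 step: partition nums into maximal segments of elements ≤ M
def pvSplitStep (M : Int) (st : List (List Int) × List Int) (num : Int) :
    List (List Int) × List Int :=
  if num > M then (st.1 ++ [st.2], []) else (st.1, st.2 ++ [num])

def countSubarraysWithSumAndMaxAtMost_alt (nums : List Int) (k : Int) (M : Int) : Int :=
  let s := nums.foldl (pvSplitStep M) ([], [])
  let segments := s.1 ++ [s.2]
  segments.foldl (fun total seg => (seg.foldl (pvStep k) (pvDict0, total, 0)).2.1) 0

-- ===== PRECONDITION & SPEC =====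
def Spec_countSubarraysWithSumAndMaxAtMost (nums : List Int) (k : Int) (M : Int) (out : Int) : Prop := out = countSubarraysWithSumAndMaxAtMost_alt nums k M
instance (nums : List Int) (k : Int) (M : Int) (out : Int) : Decidable (Spec_countSubarraysWithSumAndMaxAtMost nums k M out) := by unfold Spec_countSubarraysWithSumAndMaxAtMost; infer_instance

-- ===== CLAIM (what is proved, stated in full; the proofs are below) =====
def Claim_equal_countSubarraysWithSumAndMaxAtMost : Prop := ∀ (nums : List Int) (k : Int) (M : Int), Dom_countSubarraysWithSumAndMaxAtMost nums k M → Spec_countSubarraysWithSumAndMaxAtMost nums k M (countSubarraysWithSumAndMaxAtMost nums k M)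

-- ===== LEMMAS AND PROOFS =====

-- the segment list B's phase 1 computes, as a structural recursion
def pvSplit (M : Int) : List Int → List (List Int)
  | [] => [[]]
  | x :: xs =>
    if x > M then [] :: pvSplit M xs
    else match pvSplit M xs with
         | [] => [[x]]
         | s :: ss => (x :: s) :: ss

def pvMapHead (f : List Int → List Int) : List (List Int) → List (List Int)
  | [] => []
  | s :: ss => f s :: ss

theorem pvSplit_ne_nil (M : Int) (l : List Int) : pvSplit M l ≠ [] := by
  cases l with
  | nil => simp [pvSplit]
  | cons x xs =>
    simp only [pvSplit]
    split
    · simp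
    · cases pvSplit M xs <;> simp

theorem pvMapHead_id (l : List (List Int)) : pvMapHead (fun s => [] ++ s) l = l := by
  cases l <;> simp [pvMapHead]

theorem pvSplit_fold (M : Int) (l : List Int) :
    ∀ (segs : List (List Int)) (cur : List Int),
      (l.foldl (pvSplitStep M) (segs, cur)).1 ++ [(l.foldl (pvSplitStep M) (segs, cur)).2]
        = segs ++ pvMapHead (fun s => cur ++ s) (pvSplit M l) := by
  induction l with
  | nil => intro segs cur; simp [pvSplit, pvMapHead]
  | cons x xs ih =>
    intro segs cur
    by_cases h : x > M
    · simp only [List.foldl_cons, pvSplitStep, if_pos h, pvSplit]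
      rw [ih]
      have := pvSplit_ne_nil M xs
      cases hs : pvSplit M xs with
      | nil => exact absurd hs this
      | cons s ss => simp [pvMapHead]
    · simp only [List.foldl_cons, pvSplitStep, if_neg h, pvSplit]
      rw [ih]
      have := pvSplit_ne_nil M xs
      cases hs : pvSplit M xs with
      | nil => exact absurd hs this
      | cons s ss => simp [pvMapHead]

-- the answer component of pvStep is additive in the incoming answer
theorem pvStep_shift (k : Int) (d : PySem.Dict Int Int) (a p x : Int) :
    pvStep k (d, a, p) x
      = ((pvStep k (d, 0, p) x).1, a + (pvStep k (d, 0, p) x).2.1, (pvStep k (d, 0, p) x).2.2) := by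
  simp only [pvStep]
  cases d.get? (p + x - k) <;> simp

-- answer of a segment counted from dict d, running prefix p, answer 0
def pvCnt (k : Int) (seg : List Int) (d : PySem.Dict Int Int) (p : Int) : Int :=
  (seg.foldl (pvStep k) (d, 0, p)).2.1

theorem pvCnt_shift (k : Int) (seg : List Int) :
    ∀ (d : PySem.Dict Int Int) (a p : Int),
      seg.foldl (pvStep k) (d, a, p)
        = ((seg.foldl (pvStep k) (d, 0, p)).1,
           a + (seg.foldl (pvStep k) (d, 0, p)).2.1,
           (seg.foldl (pvStep k) (d, 0, p)).2.2) := by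
  induction seg with
  | nil => intro d a p; simp
  | cons x xs ih =>
    intro d a p
    simp only [List.foldl_cons]
    rw [pvStep_shift]
    rw [ih (pvStep k (d, 0, p) x).1 (a + (pvStep k (d, 0, p) x).2.1) (pvStep k (d, 0, p) x).2.2,
        ih (pvStep k (d, 0, p) x).1 (pvStep k (d, 0, p) x).2.1 (pvStep k (d, 0, p) x).2.2]
    simp [add_assoc]

-- A's total answer gain over the rest of the list, from dict d and running prefix p
def pvH (k M : Int) : List Int → PySem.Dict Int Int → Int → Int
  | [], _, _ => 0
  | x :: xs, d, p =>
    if x > M then pvH k M xs pvDict0 0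
    else (pvStep k (d, 0, p) x).2.1
         + pvH k M xs (pvStep k (d, 0, p) x).1 (pvStep k (d, 0, p) x).2.2

theorem pvA_fold (k M : Int) (l : List Int) :
    ∀ (d : PySem.Dict Int Int) (a p : Int),
      (l.foldl (fun st num => if num > M then (pvDict0, st.2.1, 0) else pvStep k st num)
        (d, a, p)).2.1 = a + pvH k M l d p := by
  induction l with
  | nil => intro d a p; simp [pvH]
  | cons x xs ih =>
    intro d a p
    by_cases h : x > M
    · simp only [List.foldl_cons, if_pos h, pvH]
      rw [ih]
    · simp only [List.foldl_cons, pvH, if_neg h]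
      rw [pvStep_shift, ih]
      ring

-- A's gain equals the count of the current (first) segment from the live state
-- plus fresh counts of the later segments
theorem pvH_split (k M : Int) (l : List Int) :
    ∀ (d : PySem.Dict Int Int) (p : Int) (s : List Int) (ss : List (List Int)),
      pvSplit M l = s :: ss →
      pvH k M l d p = pvCnt k s d p + (ss.map (fun t => pvCnt k t pvDict0 0)).sum := by
  induction l with
  | nil =>
    intro d p s ss hs
    simp only [pvSplit] at hs
    cases hs
    simp [pvH, pvCnt]
  | cons x xs ih =>
    intro d p s ss hs
    by_cases h : x > M
    · simp only [pvSplit, if_pos h] at hs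
      have hne := pvSplit_ne_nil M xs
      cases ht : pvSplit M xs with
      | nil => exact absurd ht hne
      | cons s' ss' =>
        rw [ht] at hs
        cases hs
        simp only [pvH, if_pos h]
        rw [ih pvDict0 0 s' ss' ht]
        simp [pvCnt, List.sum_cons]
    · simp only [pvSplit, if_neg h] at hs
      have hne := pvSplit_ne_nil M xs
      cases ht : pvSplit M xs with
      | nil => exact absurd ht hne
      | cons s' ss' =>
        rw [ht] at hs
        injection hs with h1 h2
        subst h1; subst h2
        simp only [pvH, if_neg h]
        rw [ih (pvStep k (d, 0, p) x).1 (pvStep k (d, 0, p) x).2.2 s' ss' ht]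
        simp only [pvCnt, List.foldl_cons]
        rw [pvCnt_shift k s' (pvStep k (d, 0, p) x).1 (pvStep k (d, 0, p) x).2.1
              (pvStep k (d, 0, p) x).2.2]
        ring

-- B's outer loop sums the fresh per-segment counts
theorem pvB_fold (k : Int) (segs : List (List Int)) :
    ∀ (t : Int),
      segs.foldl (fun total seg => (seg.foldl (pvStep k) (pvDict0, total, 0)).2.1) t
        = t + (segs.map (fun s => pvCnt k s pvDict0 0)).sum := by
  induction segs with
  | nil => intro t; simp
  | cons s ss ih =>
    intro t
    simp only [List.foldl_cons, List.map_cons, List.sum_cons]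
    rw [pvCnt_shift k s pvDict0 t 0, ih]
    simp only [pvCnt]
    ring

theorem pvAlt_eq (nums : List Int) (k M : Int) :
    countSubarraysWithSumAndMaxAtMost_alt nums k M
      = ((pvSplit M nums).map (fun s => pvCnt k s pvDict0 0)).sum := by
  simp only [countSubarraysWithSumAndMaxAtMost_alt]
  have hseg := pvSplit_fold M nums [] []
  rw [pvMapHead_id] at hseg
  simp only [List.nil_append] at hseg
  have : (nums.foldl (pvSplitStep M) ([], [])).1 ++ [(nums.foldl (pvSplitStep M) ([], [])).2]
      = pvSplit M nums := hseg
  rw [this, pvB_fold]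
  simp

-- ===== VERDICT (by name: the statement is the Claim_ definition above) =====
theorem countSubarraysWithSumAndMaxAtMost_spec : Claim_equal_countSubarraysWithSumAndMaxAtMost := by
  intro nums k M _
  show countSubarraysWithSumAndMaxAtMost nums k M = countSubarraysWithSumAndMaxAtMost_alt nums k M
  rw [pvAlt_eq]
  by_cases hn : nums = []
  · subst hn
    simp [countSubarraysWithSumAndMaxAtMost, pvSplit, pvCnt]
  · simp only [countSubarraysWithSumAndMaxAtMost, if_neg hn]
    rw [pvA_fold]
    have hne := pvSplit_ne_nil M nums
    cases hs : pvSplit M nums with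
    | nil => exact absurd hs hne
    | cons s ss =>
      rw [pvH_split k M nums pvDict0 0 s ss hs]
      simp
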